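-- pv_equiv track=rewrite | github.com/prosper1/beginners | search_contacts.py | solution
-- ===== SOURCE A (Python) =====
-- def solution(A,B,P):
--     results = []
--     count = 0
--     result = 'NO CONTACT'
--     for x in B:
--         if x.find(P) >= 0:
--             results.append(A[count])
--
--         count = count + 1
--
--     results = sorted(results)
--
--     if results:
--         result = results[0]
--     return result
-- ===== SOURCE B (Python) =====
-- def solution(A, B, P):
--     best = None
--     for a, b in zip(A, B):
--         if P in b and (best is None or a < best):
--             best = a
--     return best if best is not None else 'NO CONTACT'
-- ===== Notes on version B (the rewrite author's own statement) =====
-- stated objective: simpler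
-- what changed: Replaced collect-matches-then-sort-then-take-first (with a manual index counter) by a single zip pass maintaining a running minimum with a None sentinel, eliminating the intermediate list and the sort.
import Mathlib
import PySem

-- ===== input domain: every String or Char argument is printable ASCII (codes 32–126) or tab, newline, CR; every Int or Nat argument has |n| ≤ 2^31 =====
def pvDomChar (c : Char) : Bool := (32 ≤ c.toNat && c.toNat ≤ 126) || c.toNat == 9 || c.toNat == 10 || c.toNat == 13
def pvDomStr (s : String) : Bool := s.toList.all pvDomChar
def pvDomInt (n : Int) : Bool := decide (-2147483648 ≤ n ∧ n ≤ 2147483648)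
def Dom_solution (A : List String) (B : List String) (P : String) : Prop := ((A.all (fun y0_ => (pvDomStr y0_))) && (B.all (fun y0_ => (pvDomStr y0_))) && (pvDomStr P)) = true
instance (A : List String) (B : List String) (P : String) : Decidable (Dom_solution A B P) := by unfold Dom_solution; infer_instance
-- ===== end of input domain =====

-- B replaces collect-then-sort-then-take-first by a single zip pass keeping a running minimum; equal on Pre_ (A raises IndexError outside it).


-- ===== PORT A =====
-- loop body of A: append A[count] when x.find(P) >= 0, then count += 1
def stepA (A : List String) (P : String) (s : List String × Int) (x : String) : List String × Int :=
  if PySem.Str.find x P ≥ 0 then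
    (s.1 ++ [(PySem.List.pyGet? A s.2).getD ""], s.2 + 1)
  else (s.1, s.2 + 1)

def stepB (P : String) (best : Option String) (ab : String × String) : Option String :=
  if PySem.Str.isIn P ab.2 &&
     (match best with | none => true | some m => decide (ab.1 < m)) then
    some ab.1
  else best


def solution (A : List String) (B : List String) (P : String) : String :=
  match PySem.List.sorted (B.foldl (stepA A P) ([], (0 : Int))).1 (fun y => y) false with
  | [] => "NO CONTACT"
  | y :: _ => y

-- ===== PORT B =====
def solution_alt (A : List String) (B : List String) (P : String) : String :=
  ((A.zip B).foldl (stepB P) none).getD "NO CONTACT"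

-- ===== PRECONDITION & SPEC =====
-- Pre_ excludes exactly the inputs on which A raises IndexError: some B-entry containing P at an index ≥ A.length.
def Pre_solution (A : List String) (B : List String) (P : String) : Prop :=
  ((B.drop A.length).all (fun b => !PySem.Str.isIn P b)) = true
instance (A : List String) (B : List String) (P : String) : Decidable (Pre_solution A B P) := by unfold Pre_solution; infer_instance
def pvWitness_solution : List String × List String × String := (["bob", "ann"], ["x123", "y12"], "12")

def Spec_solution (A : List String) (B : List String) (P : String) (out : String) : Prop := out = solution_alt A B P
instance (A : List String) (B : List String) (P : String) (out : String) : Decidable (Spec_solution A B P out) := by unfold Spec_solution; infer_instance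

-- ===== CLAIM (what is proved, stated in full; the proofs are below) =====
def Claim_equal_solution : Prop := ∀ (A : List String) (B : List String) (P : String), Dom_solution A B P → Pre_solution A B P → Spec_solution A B P (solution A B P)

-- ===== LEMMAS AND PROOFS =====
def stepMin (best : Option String) (a : String) : Option String :=
  if (match best with | none => true | some m => decide (a < m)) then some a else best

lemma foldA_eq (P : String) (A : List String) :
    ∀ (B' A' : List String) (i : Nat) (acc : List String),
    A.drop i = A' →
    ((B'.drop A'.length).all (fun b => !PySem.Str.isIn P b)) = true →
    (B'.foldl (stepA A P) (acc, (i : Int))).1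
      = acc ++ ((A'.zip B').filter (fun ab => PySem.Str.isIn P ab.2)).map (·.1) := by
  intro B'
  induction B' with
  | nil => intro A' i acc _ _; simp
  | cons b B'' ih =>
    intro A' i acc hA hall
    have hcast : ((i : Int) + 1) = ((i + 1 : Nat) : Int) := by push_cast; ring
    cases A' with
    | nil =>
      simp only [List.length_nil, List.drop_zero, List.all_cons, Bool.and_eq_true,
        Bool.not_eq_true'] at hall
      have hm : PySem.Str.isIn P b = false := by simpa using hall.1
      have hf : ¬ (PySem.Str.find b P ≥ 0) := by
        rw [ge_iff_le, PySem.Str.find_nonneg_iff]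
        intro hinf
        have h2 := (PySem.Str.isIn_iff_infix P b).2 hinf
        rw [hm] at h2; exact Bool.false_ne_true h2
      have hA1 : A.drop (i + 1) = [] := by
        rw [List.drop_eq_nil_iff] at hA ⊢; omega
      simp only [List.foldl_cons, stepA, if_neg hf, hcast]
      rw [ih [] (i + 1) acc hA1 (by simpa [List.all_eq_true] using hall.2)]
      simp
    | cons a A'' =>
      have hi : A[i]? = some a := by
        have h0 : (A.drop i)[0]? = some a := by rw [hA]; rfl
        simpa using h0
      have hget : PySem.List.pyGet? A (i : Int) = some a := by
        rw [PySem.List.pyGet?_natCast]; exact hi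
      have hA1 : A.drop (i + 1) = A'' := by
        have h1 : (A.drop i).drop 1 = A'' := by rw [hA]; rfl
        rwa [List.drop_drop] at h1
      have hall' : ((B''.drop A''.length).all (fun b => !PySem.Str.isIn P b)) = true := by
        simpa using hall
      by_cases hm : PySem.Chars.isIn P.toList b.toList = true
      · have hf : PySem.Str.find b P ≥ 0 := by
          rw [ge_iff_le, PySem.Str.find_nonneg_iff]
          exact (PySem.Chars.isIn_iff_infix P.toList b.toList).1 hm
        simp only [List.foldl_cons, stepA, if_pos hf, hget, Option.getD_some, hcast]
        rw [ih A'' (i + 1) (acc ++ [a]) hA1 hall']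
        simp [hm]
      · have hf : ¬ (PySem.Str.find b P ≥ 0) := by
          rw [ge_iff_le, PySem.Str.find_nonneg_iff]
          exact fun hinf => hm ((PySem.Chars.isIn_iff_infix P.toList b.toList).2 hinf)
        simp only [List.foldl_cons, stepA, if_neg hf, hcast]
        rw [ih A'' (i + 1) acc hA1 hall']
        simp [hm]

lemma foldB_eq (P : String) :
    ∀ (l : List (String × String)) (init : Option String),
    l.foldl (stepB P) init
      = ((l.filter (fun ab => PySem.Str.isIn P ab.2)).map (·.1)).foldl stepMin init := by
  intro l
  induction l with
  | nil => intro init; rfl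
  | cons ab l ih =>
    intro init
    by_cases hm : PySem.Chars.isIn P.toList ab.2.toList = true
    · simp only [List.foldl_cons, List.filter_cons, PySem.Str.isIn_eq, hm, if_pos, List.map_cons]
      rw [ih]
      congr 1
      simp [stepB, stepMin, hm]
    · simp only [List.foldl_cons, List.filter_cons, PySem.Str.isIn_eq, hm]
      rw [ih]
      congr 1
      simp [stepB, hm]

lemma foldMin_some : ∀ (t : List String) (m : String),
    t.foldl stepMin (some m) = some (t.foldl min m) := by
  intro t
  induction t with
  | nil => intro m; rfl
  | cons a t ih =>
    intro m
    have hstep : stepMin (some m) a = some (min m a) := by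
      by_cases h : a < m
      · simp [stepMin, h, min_eq_right (le_of_lt h)]
      · simp [stepMin, h, min_eq_left (not_lt.1 h)]
    simp only [List.foldl_cons, hstep, ih]

lemma head_sorted_eq (M : List String) :
    (match PySem.List.sorted M (fun y => y) false with
     | [] => "NO CONTACT"
     | y :: _ => y)
      = (M.foldl stepMin none).getD "NO CONTACT" := by
  cases M with
  | nil => rfl
  | cons m t =>
    have hne : PySem.List.sorted (m :: t) (fun y => y) false ≠ [] := by
      rw [Ne, PySem.List.sorted_eq_nil_iff]; simp
    obtain ⟨y, ys, hs⟩ : ∃ y ys, PySem.List.sorted (m :: t) (fun y => y) false = y :: ys := by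
      cases h : PySem.List.sorted (m :: t) (fun y => y) false with
      | nil => exact absurd h hne
      | cons y ys => exact ⟨y, ys, rfl⟩
    have hstep : (m :: t).foldl stepMin none = some (t.foldl min m) := by
      simp only [List.foldl_cons]
      have h0 : stepMin none m = some m := rfl
      rw [h0, foldMin_some]
    rw [hstep, hs]
    simp only [Option.getD_some]
    have hymem : y ∈ m :: t := by
      rw [← PySem.List.mem_sorted (m :: t) (fun y => y) false y, hs]
      simp
    have hmin_mem : t.foldl min m ∈ m :: t := by
      rcases PySem.List.foldl_min_mem t m with h | h
      · rw [h]; simp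
      · exact List.mem_cons_of_mem _ h
    have h1 : y ≤ t.foldl min m := PySem.List.key_head_sorted_le _ _ hs _ hmin_mem
    have h2 : t.foldl min m ≤ y := by
      rcases List.mem_cons.1 hymem with h | h
      · rw [h]; exact (PySem.List.foldl_min_le t m).1
      · exact (PySem.List.foldl_min_le t m).2 y h
    exact le_antisymm h1 h2


-- ===== VERDICT =====
theorem solution_spec : Claim_equal_solution := by
  intro A B P _ hpre
  unfold Spec_solution solution solution_alt
  rw [foldB_eq]
  rw [show (0 : Int) = ((0 : Nat) : Int) by simp] 
  rw [foldA_eq P A B A 0 [] (by simp) hpre]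
  simp only [List.nil_append]
  exact head_sorted_eq _
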